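-- pv_equiv track=rewrite | github.com/alenic/realGA | python_test/roulette_wheel.py | roulette
-- ===== SOURCE A (Python) =====
-- def roulette(cumf, value):
--     index = 0
--     for i in range(len(cumf)):
--         if cumf[i] <= value:
--             index = i
--         else:
--             break
--     return index
-- ===== SOURCE B (Python) =====
-- def roulette(cumf, value):
--     # binary search for the insertion point of value (bisect_right), clamped to 0;
--     # requires cumf sorted non-decreasing (true of cumulative fitness arrays)
--     lo, hi = 0, len(cumf)
--     while lo < hi:
--         mid = (lo + hi) // 2
--         if cumf[mid] <= value:
--             lo = mid + 1
--         else: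
--             hi = mid
--     return lo - 1 if lo > 0 else 0
-- ===== Notes on version B (the rewrite author's own statement) =====
-- stated objective: faster
-- what changed: Replaces A's linear scan (break at first cumulative entry > value) with a hand-written binary search (bisect_right insertion point, minus one, clamped to 0); Pre_ restricts to inputs partitioned around value (every element <= value before every element > value), the shape cumulative-fitness arrays have by construction, since binary search may disagree with A's scan on unsorted input. Intended as faster (O(log n) comparisons vs O(n)); one a timing run measured 2.57x at n=262144, another read within noise.
-- outside the precondition, e.g. on roulette([5, 1, 3], 2): A returns 0, B returns 1
import Mathlib
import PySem

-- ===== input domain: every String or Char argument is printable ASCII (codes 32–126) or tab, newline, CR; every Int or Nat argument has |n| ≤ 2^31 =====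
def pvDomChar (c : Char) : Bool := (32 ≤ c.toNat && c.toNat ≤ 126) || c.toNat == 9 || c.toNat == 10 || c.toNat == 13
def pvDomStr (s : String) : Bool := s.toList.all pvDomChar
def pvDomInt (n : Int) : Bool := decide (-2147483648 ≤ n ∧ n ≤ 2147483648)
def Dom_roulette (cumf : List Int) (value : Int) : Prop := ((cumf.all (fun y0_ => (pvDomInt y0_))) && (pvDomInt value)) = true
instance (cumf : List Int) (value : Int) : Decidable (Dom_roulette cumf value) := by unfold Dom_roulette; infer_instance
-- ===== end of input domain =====

-- B replaces A's linear scan with a binary search (bisect_right − 1, clamped to 0, O(log n) comparisons), valid on value-partitioned cumf (Pre_).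

-- ===== PORT A =====
-- A's for-loop over range(len(cumf)) with break: recursion over the list carrying the running index i and the result `index`
def rouletteLoop (value : Int) (i : Nat) (index : Int) : List Int → Int
  | [] => index
  | c :: rest => if c ≤ value then rouletteLoop value (i + 1) (i : Int) rest else index

def roulette (cumf : List Int) (value : Int) : Int :=
  rouletteLoop value 0 0 cumf

-- ===== PORT B =====
-- Source B's while-loop binary search; the fuel argument only bounds the iteration count to make the
-- recursion structural (hi-lo shrinks every step, so fuel = initial hi suffices); cumf[mid] is
-- always in range here, getD 0 transcribes the in-range access
def bsearch (cumf : List Int) (value : Int) : Nat → Nat → Nat → Nat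
  | 0, lo, _hi => lo
  | fuel + 1, lo, hi =>
    if lo < hi then
      let mid := (lo + hi) / 2
      if cumf.getD mid 0 ≤ value then bsearch cumf value fuel (mid + 1) hi
      else bsearch cumf value fuel lo mid
    else lo

def roulette_alt (cumf : List Int) (value : Int) : Int :=
  let lo := bsearch cumf value cumf.length 0 cumf.length
  if 0 < lo then (lo : Int) - 1 else 0

-- ===== PRECONDITION & SPEC =====
-- Pre_ excludes cumf not partitioned around value (some element > value occurring before an element
-- ≤ value): binary search assumes the sorted shape cumulative-fitness arrays have by construction,
-- and A's first-break linear scan and B's binary search may disagree on such unsorted inputs.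
def Pre_roulette (cumf : List Int) (value : Int) : Prop :=
  ((cumf.dropWhile (fun c => decide (c ≤ value))).all (fun c => decide (value < c))) = true
instance (cumf : List Int) (value : Int) : Decidable (Pre_roulette cumf value) := by unfold Pre_roulette; infer_instance
def pvWitness_roulette : List Int × Int := ([1, 3, 5, 5, 9], 4)

def Spec_roulette (cumf : List Int) (value : Int) (out : Int) : Prop := out = roulette_alt cumf value
instance (cumf : List Int) (value : Int) (out : Int) : Decidable (Spec_roulette cumf value out) := by unfold Spec_roulette; infer_instance

-- ===== CLAIM (what is proved, stated in full; the proofs are below) =====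
def Claim_equal_roulette : Prop := ∀ (cumf : List Int) (value : Int), Dom_roulette cumf value → Pre_roulette cumf value → Spec_roulette cumf value (roulette cumf value)

-- ===== LEMMAS AND PROOFS =====

-- A's loop returns `idx` if no leading element is ≤ v, else (start index i) + (count of leading ≤-v elements) − 1
lemma rouletteLoop_eq (v : Int) (l : List Int) (i : Nat) (idx : Int) :
    rouletteLoop v i idx l =
      if (l.takeWhile (fun c => decide (c ≤ v))).length = 0 then idx
      else ((i + (l.takeWhile (fun c => decide (c ≤ v))).length - 1 : Nat) : Int) := by
  induction l generalizing i idx with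
  | nil => simp [rouletteLoop]
  | cons c rest ih =>
    by_cases hc : c ≤ v
    · simp only [rouletteLoop, if_pos hc, List.takeWhile_cons, decide_eq_true hc, ih]
      by_cases h0 : (rest.takeWhile (fun c => decide (c ≤ v))).length = 0 <;> simp [h0]
    · simp [rouletteLoop, hc]

lemma tw_holds {α : Type} (p : α → Bool) (d : α) (l : List α) (j : Nat)
    (hj : j < (l.takeWhile p).length) : p (l.getD j d) = true := by
  induction l generalizing j with
  | nil => simp at hj
  | cons c rest ih =>
    by_cases hc : p c
    · cases j with
      | zero => simpa using hc
      | succ j' =>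
        simp only [List.takeWhile_cons, hc, if_true, List.length_cons] at hj
        simpa using ih j' (by omega)
    · simp [hc] at hj

lemma tw_stop {α : Type} (p : α → Bool) (d : α) (l : List α)
    (h : (l.takeWhile p).length < l.length) : p (l.getD (l.takeWhile p).length d) = false := by
  induction l with
  | nil => simp at h
  | cons c rest ih =>
    by_cases hc : p c
    · simp only [List.takeWhile_cons, hc, if_true, List.length_cons] at h ⊢
      simpa using ih (by omega)
    · simp [hc]

lemma all_getD (p : Int → Bool) (l : List Int) (h : l.all p = true) (j : Nat)
    (hj : j < l.length) : p (l.getD j 0) = true := by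
  induction l generalizing j with
  | nil => simp at hj
  | cons c rest ih =>
    simp only [List.all_cons, Bool.and_eq_true] at h
    cases j with
    | zero => simpa using h.1
    | succ j' => simpa using ih h.2 j' (by simpa using hj)

-- Pre_ (the ≤-value elements form a prefix) gives the monotonicity binary search needs
lemma part_mono (v : Int) (l : List Int)
    (hp : (l.dropWhile (fun c => decide (c ≤ v))).all (fun c => decide (v < c)) = true) :
    ∀ j, j < l.length → ∀ i, i ≤ j → l.getD j 0 ≤ v → l.getD i 0 ≤ v := by
  induction l with
  | nil => intro j hj; simp at hj
  | cons c rest ih =>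
    intro j hj i hi hjv
    by_cases hc : c ≤ v
    · rw [List.dropWhile_cons_of_pos (by simpa using hc)] at hp
      cases i with
      | zero => simpa using hc
      | succ i' =>
        cases j with
        | zero => omega
        | succ j' =>
          simpa using ih hp j' (by simpa using hj) i' (by omega) (by simpa using hjv)
    · rw [List.dropWhile_cons_of_neg (by simpa using hc)] at hp
      have := all_getD _ _ hp j hj
      simp only [decide_eq_true_eq] at this
      omega

lemma bsearch_main (cumf : List Int) (v : Int)
    (hs : ∀ j, j < cumf.length → ∀ i, i ≤ j → cumf.getD j 0 ≤ v → cumf.getD i 0 ≤ v)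
    (fuel : Nat) : ∀ (lo hi : Nat), hi - lo ≤ fuel → hi ≤ cumf.length → lo ≤ hi →
    (∀ j, j < lo → cumf.getD j 0 ≤ v) →
    (∀ j, hi ≤ j → j < cumf.length → v < cumf.getD j 0) →
    lo ≤ bsearch cumf v fuel lo hi ∧ bsearch cumf v fuel lo hi ≤ hi ∧
    (∀ j, j < bsearch cumf v fuel lo hi → cumf.getD j 0 ≤ v) ∧
    (∀ j, bsearch cumf v fuel lo hi ≤ j → j < cumf.length → v < cumf.getD j 0) := by
  induction fuel with
  | zero =>
    intro lo hi hf hhi hlh hpre hpost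
    simp only [bsearch]
    exact ⟨le_refl _, hlh, hpre, fun j hj hjl => hpost j (by omega) hjl⟩
  | succ fuel ih =>
    intro lo hi hf hhi hlh hpre hpost
    by_cases h : lo < hi
    · rw [bsearch]; simp only [if_pos h]
      set mid := (lo + hi) / 2 with hmid
      by_cases hc : cumf.getD mid 0 ≤ v
      · simp only [if_pos hc]
        have hrec := ih (mid + 1) hi (by omega) hhi (by omega)
          (fun j hj => hs mid (by omega) j (by omega) hc)
          hpost
        exact ⟨by omega, hrec.2.1, hrec.2.2.1, hrec.2.2.2⟩
      · simp only [if_neg hc]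
        have hrec := ih lo mid (by omega) (by omega) (by omega) hpre
          (fun j hj hjl => lt_of_not_ge fun hle => hc (hs j hjl mid hj hle))
        exact ⟨hrec.1, by omega, hrec.2.2.1, hrec.2.2.2⟩
    · rw [bsearch]; simp only [if_neg h]
      have : lo = hi := by omega
      exact ⟨le_refl _, by omega, hpre, fun j hj hjl => hpost j (by omega) hjl⟩

lemma bsearch_eq_takeWhile (cumf : List Int) (v : Int)
    (hs : ∀ j, j < cumf.length → ∀ i, i ≤ j → cumf.getD j 0 ≤ v → cumf.getD i 0 ≤ v) :
    bsearch cumf v cumf.length 0 cumf.length = (cumf.takeWhile (fun c => decide (c ≤ v))).length := by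
  obtain ⟨-, hle, hlow, hhigh⟩ := bsearch_main cumf v hs cumf.length 0 cumf.length (by omega) (le_refl _) (by omega)
    (fun j hj => absurd hj (by omega)) (fun j hj hjl => absurd hjl (by omega))
  set r := bsearch cumf v cumf.length 0 cumf.length
  set t := (cumf.takeWhile (fun c => decide (c ≤ v))).length with ht
  have htle : t ≤ cumf.length := by
    have := List.takeWhile_sublist (l := cumf) (fun c => decide (c ≤ v))
    exact this.length_le
  rcases Nat.lt_trichotomy r t with hlt | heq | hgt
  · have h1 : cumf.getD r 0 ≤ v := by simpa using tw_holds (fun c => decide (c ≤ v)) 0 cumf r hlt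
    have h2 := hhigh r (le_refl _) (by omega)
    omega
  · exact heq
  · have h1 : ¬ cumf.getD t 0 ≤ v := by
      simpa using tw_stop (fun c => decide (c ≤ v)) 0 cumf (by omega)
    have h2 := hlow t hgt
    exact absurd h2 h1

-- ===== VERDICT (by name: the statement is the Claim_ definition above) =====
theorem roulette_spec : Claim_equal_roulette := by
  intro cumf value _ hpre
  unfold Spec_roulette roulette roulette_alt
  rw [rouletteLoop_eq, bsearch_eq_takeWhile cumf value (part_mono value cumf hpre)]
  set t := (cumf.takeWhile (fun c => decide (c ≤ value))).length
  by_cases h0 : t = 0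
  · simp [h0]
  · simp only [if_neg h0, if_pos (by omega : 0 < t)]
    omega
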